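-- pv_equiv track=rewrite | github.com/med13foundation/artana-evidence-platform | services/artana_evidence_api/onboarding_prompt.py | _reply_signals_uncertainty
-- ===== SOURCE A (Python) =====
-- def _reply_signals_uncertainty(reply_text: str) -> bool:
--     normalized = reply_text.casefold()
--     markers = (
--         "don't know",
--         "do not know",
--         "not sure",
--         "unsure",
--         "no idea",
--         "help me",
--         "examples",
--         "example",
--         "can you provide",
--         "can you give",
--         "i do not know",
--         "i don't know",
--         "idk",
--     )
--     return any(marker in normalized for marker in markers)
-- ===== SOURCE B (Python) =====
-- def _reply_signals_uncertainty(reply_text: str) -> bool: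
--     markers = (
--         "don't know",
--         "do not know",
--         "not sure",
--         "unsure",
--         "no idea",
--         "help me",
--         "examples",
--         "example",
--         "can you provide",
--         "can you give",
--         "i do not know",
--         "i don't know",
--         "idk",
--     )
--     text = reply_text.casefold()
--     # single left-to-right pass: at each position test whether any marker starts there
--     for i in range(len(text) + 1):
--         for m in markers:
--             if text.startswith(m, i):
--                 return True
--     return False
-- ===== Notes on version B (the rewrite author's own statement) =====
-- stated objective: alternative
-- what changed: Replaces 13 independent whole-text substring-containment scans, one per marker, with a single left-to-right pass over positions that tests at each position whether any marker starts there via startswith.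
import Mathlib
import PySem

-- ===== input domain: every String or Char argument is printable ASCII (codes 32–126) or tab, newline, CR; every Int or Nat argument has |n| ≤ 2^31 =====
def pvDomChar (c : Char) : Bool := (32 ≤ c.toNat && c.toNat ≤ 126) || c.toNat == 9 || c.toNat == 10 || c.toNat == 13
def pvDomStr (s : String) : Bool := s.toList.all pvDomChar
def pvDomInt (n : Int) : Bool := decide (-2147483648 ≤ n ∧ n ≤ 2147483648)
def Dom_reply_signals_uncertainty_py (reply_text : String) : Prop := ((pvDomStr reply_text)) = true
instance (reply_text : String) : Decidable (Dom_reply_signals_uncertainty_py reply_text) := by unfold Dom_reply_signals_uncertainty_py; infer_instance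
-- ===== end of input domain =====

-- B replaces thirteen whole-text substring scans by one left-to-right pass over positions
-- testing at each position whether any marker starts there (alternative scanning strategy).
-- casefold is ported as PySem.Str.lower (identical on the ASCII domain).

-- ===== PORT A =====
def reply_signals_uncertainty_py (reply_text : String) : Bool :=
  let normalized := PySem.Str.lower reply_text
  PySem.Str.isIn "don't know" normalized ||
  PySem.Str.isIn "do not know" normalized ||
  PySem.Str.isIn "not sure" normalized ||
  PySem.Str.isIn "unsure" normalized ||
  PySem.Str.isIn "no idea" normalized ||
  PySem.Str.isIn "help me" normalized ||
  PySem.Str.isIn "examples" normalized ||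
  PySem.Str.isIn "example" normalized ||
  PySem.Str.isIn "can you provide" normalized ||
  PySem.Str.isIn "can you give" normalized ||
  PySem.Str.isIn "i do not know" normalized ||
  PySem.Str.isIn "i don't know" normalized ||
  PySem.Str.isIn "idk" normalized

-- ===== PORT B =====
def pvMarkers : List String :=
  ["don't know", "do not know", "not sure", "unsure", "no idea", "help me",
   "examples", "example", "can you provide", "can you give",
   "i do not know", "i don't know", "idk"]

-- the position loop of Source B: at each suffix, does some marker start here?
def pvScan (cs : List Char) : Bool :=
  match cs with
  | [] => pvMarkers.any (fun m => m.toList.isPrefixOf [])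
  | c :: rest => pvMarkers.any (fun m => m.toList.isPrefixOf (c :: rest)) || pvScan rest

def reply_signals_uncertainty_py_alt (reply_text : String) : Bool :=
  pvScan (PySem.Str.lower reply_text).toList

-- ===== PRECONDITION & SPEC =====
def Spec_reply_signals_uncertainty_py (reply_text : String) (out : Bool) : Prop := out = reply_signals_uncertainty_py_alt reply_text
instance (reply_text : String) (out : Bool) : Decidable (Spec_reply_signals_uncertainty_py reply_text out) := by unfold Spec_reply_signals_uncertainty_py; infer_instance

-- ===== CLAIM (what is proved, stated in full; the proofs are below) =====
def Claim_equal_reply_signals_uncertainty_py : Prop := ∀ (reply_text : String), Dom_reply_signals_uncertainty_py reply_text → Spec_reply_signals_uncertainty_py reply_text (reply_signals_uncertainty_py reply_text)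

-- ===== LEMMAS AND PROOFS =====
theorem pvScan_iff (cs : List Char) :
    pvScan cs = true ↔ ∃ m ∈ pvMarkers, m.toList <:+: cs := by
  induction cs with
  | nil => simp [pvScan, List.isPrefixOf_iff_prefix]
  | cons c rest ih =>
    simp only [pvScan, Bool.or_eq_true, List.any_eq_true,
      List.isPrefixOf_iff_prefix, ih, List.infix_cons_iff]
    constructor
    · rintro (⟨m, hm, h⟩ | ⟨m, hm, h⟩)
      · exact ⟨m, hm, Or.inl h⟩
      · exact ⟨m, hm, Or.inr h⟩
    · rintro ⟨m, hm, h | h⟩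
      · exact Or.inl ⟨m, hm, h⟩
      · exact Or.inr ⟨m, hm, h⟩


theorem pvA_eq_any (t : String) :
    reply_signals_uncertainty_py t
      = pvMarkers.any (fun m => PySem.Str.isIn m (PySem.Str.lower t)) := by
  simp only [reply_signals_uncertainty_py, pvMarkers, List.any_cons, List.any_nil,
    Bool.or_false, Bool.or_assoc]

-- ===== VERDICT (by name: the statement is the Claim_ definition above) =====
theorem reply_signals_uncertainty_py_spec : Claim_equal_reply_signals_uncertainty_py := by
  intro reply_text _
  unfold Spec_reply_signals_uncertainty_py
  rw [pvA_eq_any, Bool.eq_iff_iff]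
  rw [reply_signals_uncertainty_py_alt, pvScan_iff, List.any_eq_true]
  simp only [PySem.Str.isIn_iff_infix]
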